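-- pv_equiv track=rewrite | github.com/NKaty/AdventOfCode | day8/task2.py | format_image
-- ===== SOURCE A (Python) =====
-- def format_image(image, size):
--     if len(image) % (size[0] * size[1]) != 0:
--         raise Exception('Broken image.')
--
--     layers = []
--     layer = []
--     count_row = 0
--
--     for i in range(0, len(image) - size[0] + 1, size[0]):
--         layer.append(image[i:i+size[0]])
--         count_row += 1
--         if count_row == size[1]:
--             layers.append(layer)
--             layer = []
--             count_row = 0
--
--     return layers
-- ===== SOURCE B (Python) =====
-- def format_image(image, size):
--     if len(image) % (size[0] * size[1]) != 0:
--         raise Exception('Broken image.')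
--     w, h = size
--     rows = [image[i:i+w] for i in range(0, len(image), w)]
--     return [rows[j:j+h] for j in range(0, len(rows), h)]
-- ===== Notes on version B (the rewrite author's own statement) =====
-- stated objective: simpler
-- what changed: The single counter-driven accumulating pass (layer/count_row state machine) is replaced by two independent comprehensions: slice the flat image into rows, then group consecutive rows into layers by list slicing.
import Mathlib
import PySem

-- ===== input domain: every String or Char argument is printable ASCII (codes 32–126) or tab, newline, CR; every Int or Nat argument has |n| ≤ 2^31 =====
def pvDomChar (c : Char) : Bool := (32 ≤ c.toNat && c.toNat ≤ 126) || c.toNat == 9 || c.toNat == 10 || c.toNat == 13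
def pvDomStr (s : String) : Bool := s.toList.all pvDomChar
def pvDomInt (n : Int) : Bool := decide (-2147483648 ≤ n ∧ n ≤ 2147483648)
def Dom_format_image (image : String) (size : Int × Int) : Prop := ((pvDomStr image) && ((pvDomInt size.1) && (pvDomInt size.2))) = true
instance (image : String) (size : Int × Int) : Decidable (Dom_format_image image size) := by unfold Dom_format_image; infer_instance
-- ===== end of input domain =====

-- B replaces A's single counter-driven accumulating pass by two independent passes
-- (slice into rows, then group consecutive rows into layers by slicing); same cost, simpler shape.

-- ===== PORT A =====
-- A's loop body after the row is sliced: append it to the current layer, bump the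
-- counter, and close the layer when the counter reaches size[1]
def fiStep (h : Int) (s : List (List String) × List String × Int) (row : String) :
    List (List String) × List String × Int :=
  let layer := s.2.1 ++ [row]
  let c := s.2.2 + 1
  if c = h then (s.1 ++ [layer], [], 0) else (s.1, layer, c)

def format_image (image : String) (size : Int × Int) : List (List String) :=
  if PySem.Int.mod (PySem.Str.len image) (size.1 * size.2) ≠ 0 then
    []  -- Python raises here ('Broken image.' Exception, or ZeroDivisionError when size.1*size.2 = 0): outside Pre_
  else
    ((PySem.List.pyRange 0 (PySem.Str.len image - size.1 + 1) size.1).foldl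
      (fun s i => fiStep size.2 s (PySem.Str.slice image (some i) (some (i + size.1))))
      ([], [], 0)).1

-- ===== PORT B =====
def format_image_alt (image : String) (size : Int × Int) : List (List String) :=
  if PySem.Int.mod (PySem.Str.len image) (size.1 * size.2) ≠ 0 then
    []  -- same guard as A: Python raises here, outside Pre_
  else
    let rows := (PySem.List.pyRange 0 (PySem.Str.len image) size.1).map
      (fun i => PySem.Str.slice image (some i) (some (i + size.1)))
    (PySem.List.pyRange 0 (rows.length : Int) size.2).map
      (fun j => PySem.List.slice rows (some j) (some (j + size.2)))

-- ===== PRECONDITION & SPEC =====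
-- Pre_ excludes exactly the inputs where the Python A raises: size.1*size.2 = 0 (ZeroDivisionError)
-- and len(image) not a multiple of size.1*size.2 (the explicit 'Broken image.' Exception).
def Pre_format_image (image : String) (size : Int × Int) : Prop :=
  size.1 * size.2 ≠ 0 ∧ PySem.Int.mod (PySem.Str.len image) (size.1 * size.2) = 0
instance (image : String) (size : Int × Int) : Decidable (Pre_format_image image size) := by
  unfold Pre_format_image; infer_instance

def pvWitness_format_image : String × (Int × Int) := ("abcdefghijkl", (3, 2))

def Spec_format_image (image : String) (size : Int × Int) (out : List (List String)) : Prop := out = format_image_alt image size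
instance (image : String) (size : Int × Int) (out : List (List String)) : Decidable (Spec_format_image image size out) := by unfold Spec_format_image; infer_instance

-- ===== CLAIM (what is proved, stated in full; the proofs are below) =====
def Claim_equal_format_image : Prop := ∀ (image : String) (size : Int × Int), Dom_format_image image size → Pre_format_image image size → Spec_format_image image size (format_image image size)

-- ===== LEMMAS AND PROOFS =====

-- negative step, start 0, nonnegative stop: an empty range
lemma pyRange_neg_step_nil (b s : Int) (hs : s < 0) (hb : 0 ≤ b) :
    PySem.List.pyRange 0 b s = [] := by
  simp only [PySem.List.pyRange]
  rw [if_neg (by omega : ¬ s = 0), if_neg (by omega : ¬ 0 < s), if_neg (by omega : ¬ b < 0)]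
  simp

-- A's fold never closes a layer when h < 0 (the counter stays ≥ 0, so it never equals h)
lemma fold_neg_h (h : Int) (hh : h < 0) :
    ∀ (l : List String) (s : List (List String) × List String × Int), 0 ≤ s.2.2 →
      (l.foldl (fiStep h) s).1 = s.1 := by
  intro l
  induction l with
  | nil => intro s _; rfl
  | cons x t ih =>
    intro s hs
    simp only [List.foldl_cons, fiStep]
    rw [if_neg (by omega)]
    exact ih _ (by simp; omega)

-- one full block of exactly h rows, starting mid-layer with the counter = current layer length
lemma fold_block (h : Int) :
    ∀ (ys : List String) (acc : List (List String)) (layer : List String),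
      ys ≠ [] → (layer.length : Int) + ys.length = h →
      ys.foldl (fiStep h) (acc, layer, (layer.length : Int)) = (acc ++ [layer ++ ys], [], 0) := by
  intro ys
  induction ys with
  | nil => intro _ _ h1 _; exact absurd rfl h1
  | cons y t ih =>
    intro acc layer _ hlen
    cases t with
    | nil =>
      have hc : (layer.length : Int) + 1 = h := by
        simp only [List.length_cons, List.length_nil] at hlen; push_cast at hlen ⊢; omega
      simp [fiStep, hc]
    | cons z t' =>
      have hc : ¬ ((layer.length : Int) + 1 = h) := by
        simp only [List.length_cons] at hlen; push_cast at hlen ⊢; omega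
      have hstep : fiStep h (acc, layer, (layer.length : Int)) y
          = (acc, layer ++ [y], (((layer ++ [y]).length : Nat) : Int)) := by
        simp only [fiStep]
        rw [if_neg hc]
        simp
      rw [List.foldl_cons, hstep,
        ih acc (layer ++ [y]) (by simp)
          (by simp only [List.length_append, List.length_cons, List.length_nil] at hlen ⊢
              push_cast at hlen ⊢; omega)]
      simp

-- A's grouping fold over a list of h·m rows produces the m consecutive h-blocks
lemma fold_group (h : Int) (hh : 0 < h) :
    ∀ (m : Nat) (rs : List String) (acc : List (List String)),
      rs.length = h.toNat * m →
      rs.foldl (fiStep h) (acc, [], 0)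
      = (acc ++ (List.range m).map (fun k => (rs.drop (h.toNat * k)).take h.toNat), [], 0) := by
  intro m
  induction m with
  | zero =>
    intro rs acc hlen
    have : rs = [] := List.eq_nil_of_length_eq_zero (by omega)
    subst this; simp
  | succ m ih =>
    intro rs acc hlen
    have hht : 1 ≤ h.toNat := by omega
    have htn : (h.toNat : Int) = h := Int.toNat_of_nonneg hh.le
    have hle : h.toNat ≤ rs.length := by rw [hlen, Nat.mul_succ]; omega
    have htk : (rs.take h.toNat).length = h.toNat := by
      rw [List.length_take]; omega
    have hsplit : rs = rs.take h.toNat ++ rs.drop h.toNat := (List.take_append_drop _ _).symm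
    conv_lhs => rw [hsplit]
    rw [List.foldl_append]
    have hb := fold_block h (rs.take h.toNat) acc []
      (by intro hnil; have := congrArg List.length hnil; rw [htk] at this; simp at this; omega)
      (by simp [htk, htn])
    simp only [List.length_nil, Nat.cast_zero, List.nil_append] at hb
    rw [hb, ih (rs.drop h.toNat) _ (by rw [List.length_drop, hlen, Nat.mul_succ]; omega)]
    have hmap : (List.range m).map (fun k => ((rs.drop h.toNat).drop (h.toNat * k)).take h.toNat)
        = (List.range m).map ((fun k => (rs.drop (h.toNat * k)).take h.toNat) ∘ Nat.succ) := by
      refine List.map_congr_left fun k _ => ?_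
      simp only [Function.comp_apply, List.drop_drop, Nat.succ_eq_add_one]
      congr 2
      ring
    rw [hmap, List.range_succ_eq_map, List.map_cons, List.map_map, Nat.mul_zero, List.drop_zero]
    simp [List.append_assoc]

-- a positive-step range over [0, L) with s ∣ L, written as a mapped List.range
lemma pyRange_div (L s : Int) (hs : 0 < s) (hL : 0 ≤ L) (hdvd : s ∣ L) :
    PySem.List.pyRange 0 L s = (List.range (L / s).toNat).map (fun k : Nat => s * (k : Int)) := by
  rw [PySem.List.pyRange_of_pos 0 L hs]
  obtain ⟨q, rfl⟩ := hdvd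
  have hq : 0 ≤ q := by
    by_contra hq'
    have hq2 : q < 0 := by omega
    nlinarith [mul_pos hs (neg_pos.mpr hq2)]
  have hdivq : s * q / s = q := Int.mul_ediv_cancel_left q (by omega)
  by_cases h0 : (0 : Int) < s * q
  · rw [if_pos h0, hdivq]
    have hcnt : (s * q - 0 + s - 1) / s = q := by
      rw [show s * q - 0 + s - 1 = (s - 1) + q * s by ring,
        Int.add_mul_ediv_right _ _ (by omega : s ≠ 0),
        Int.ediv_eq_zero_of_lt (by omega) (by omega), zero_add]
    rw [hcnt]
    exact List.map_congr_left fun k _ => by rw [zero_add]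
  · have hq0 : q = 0 := by nlinarith
    subst hq0
    rw [if_neg h0, hdivq]
    simp

-- range(0, n-w+1, w) and range(0, n, w) coincide when w > 0 divides n ≥ 0
lemma pyRange_shift (n w : Int) (hw : 0 < w) (hn : 0 ≤ n) (hdvd : w ∣ n) :
    PySem.List.pyRange 0 (n - w + 1) w = PySem.List.pyRange 0 n w := by
  obtain ⟨q, rfl⟩ := hdvd
  rw [PySem.List.pyRange_of_pos _ _ hw, PySem.List.pyRange_of_pos _ _ hw]
  by_cases hq1 : 1 ≤ q
  · have h0 : (0 : Int) < w * q := by nlinarith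
    have hA : (0 : Int) < w * q - w + 1 := by nlinarith
    have c1 : (w * q - w + 1 - 0 + w - 1) / w = q := by
      rw [show w * q - w + 1 - 0 + w - 1 = w * q by ring, Int.mul_ediv_cancel_left _ (by omega)]
    have c2 : (w * q - 0 + w - 1) / w = q := by
      rw [show w * q - 0 + w - 1 = (w - 1) + q * w by ring,
        Int.add_mul_ediv_right _ _ (by omega : w ≠ 0),
        Int.ediv_eq_zero_of_lt (by omega) (by omega), zero_add]
    rw [if_pos hA, if_pos h0, c1, c2]
  · have hq0 : q = 0 := by
      by_contra hq'
      have : q < 0 := by omega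
      nlinarith [mul_pos hw (neg_pos.mpr this)]
    subst hq0
    rw [if_neg (by rw [mul_zero]; omega), if_neg (by rw [mul_zero]; omega)]

-- ===== VERDICT (by name: the statement is the Claim_ definition above) =====
theorem format_image_spec : Claim_equal_format_image := by
  intro image size _ hpre
  obtain ⟨hnz, hmod⟩ := hpre
  unfold Spec_format_image format_image format_image_alt
  rw [if_neg (not_not_intro hmod), if_neg (not_not_intro hmod)]
  dsimp only
  set w := size.1 with hw
  set h := size.2 with hh
  set n := PySem.Str.len image with hn
  have hn0 : 0 ≤ n := by rw [hn, PySem.Str.len_eq]; positivity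
  have hdvd : w * h ∣ n := (PySem.Int.mod_eq_zero_iff_dvd _ _).mp hmod
  rcases lt_trichotomy w 0 with hwlt | hweq | hwgt
  · -- w < 0: both ranges are empty, both sides are []
    rw [pyRange_neg_step_nil _ _ hwlt (by omega), pyRange_neg_step_nil _ _ hwlt hn0]
    simp [PySem.List.pyRange]
  · exact absurd (by rw [hweq, zero_mul]) hnz
  · -- w > 0
    have hhne : h ≠ 0 := fun h0 => hnz (by rw [h0, mul_zero])
    have hwdvd : w ∣ n := dvd_trans ⟨h, rfl⟩ hdvd
    rw [pyRange_shift n w hwgt hn0 hwdvd]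
    set rows := (PySem.List.pyRange 0 n w).map
      (fun i => PySem.Str.slice image (some i) (some (i + w))) with hrows
    have hfold : (PySem.List.pyRange 0 n w).foldl
        (fun s i => fiStep h s (PySem.Str.slice image (some i) (some (i + w))))
        (([], [], 0) : List (List String) × List String × Int)
        = rows.foldl (fiStep h) ([], [], 0) := by
      rw [hrows, List.foldl_map]
    rw [hfold]
    rcases lt_trichotomy h 0 with hhlt | hheq | hhgt
    · -- h < 0: A's fold never emits a layer; B's outer range is empty
      rw [fold_neg_h h hhlt rows ([], [], 0) (by simp),
        pyRange_neg_step_nil _ _ hhlt (Int.natCast_nonneg _)]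
      simp
    · exact absurd hheq hhne
    · -- h > 0: both sides are the consecutive h-blocks of rows
      obtain ⟨m0, hm0⟩ := hdvd
      have hwh : (0 : Int) < w * h := mul_pos hwgt hhgt
      have hm0nn : 0 ≤ m0 := by
        by_contra hq'
        have hm0lt : m0 < 0 := by omega
        nlinarith [mul_pos hwh (neg_pos.mpr hm0lt)]
      have hndivw : n / w = h * m0 := by
        rw [hm0, mul_assoc, Int.mul_ediv_cancel_left _ (by omega)]
      have hcast : h * m0 = ((h.toNat * m0.toNat : Nat) : Int) := by
        push_cast [Int.toNat_of_nonneg hhgt.le, Int.toNat_of_nonneg hm0nn]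
        try rfl
      have hlenrows : rows.length = h.toNat * m0.toNat := by
        rw [hrows, List.length_map, pyRange_div n w hwgt hn0 hwdvd, List.length_map,
          List.length_range, hndivw, hcast, Int.toNat_natCast]
      have hcastlen : (rows.length : Int) = h * (m0.toNat : Int) := by
        rw [hlenrows]
        push_cast [Int.toNat_of_nonneg hhgt.le]
        try rfl
      have hLdvd : h ∣ (rows.length : Int) := ⟨_, hcastlen⟩
      have hLdiv : ((rows.length : Int) / h).toNat = m0.toNat := by
        rw [hcastlen, Int.mul_ediv_cancel_left _ (by omega), Int.toNat_natCast]
      rw [fold_group h hhgt m0.toNat rows [] hlenrows,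
        pyRange_div (rows.length : Int) h hhgt (Int.natCast_nonneg _) hLdvd,
        List.map_map, hLdiv]
      simp only [List.nil_append]
      refine List.map_congr_left fun k _ => ?_
      have e1 : (h * (k : Int)).toNat = h.toNat * k := by
        rw [show h * (k : Int) = ((h.toNat * k : Nat) : Int) by
            push_cast [Int.toNat_of_nonneg hhgt.le]; try rfl, Int.toNat_natCast]
      have e2 : (h * (k : Int) + h).toNat = h.toNat * k + h.toNat := by
        rw [show h * (k : Int) + h = ((h.toNat * k + h.toNat : Nat) : Int) by
            push_cast [Int.toNat_of_nonneg hhgt.le]; try rfl, Int.toNat_natCast]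
      simp only [Function.comp_apply]
      rw [PySem.List.slice_toNat _ (by positivity) (by positivity), e1, e2]
      congr 1
      omega
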